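-- pv_equiv track=rewrite | github.com/DoanTrungHuy/practice-interview-code | 2423-remove-letter-to-equalize-frequency/2423-remove-letter-to-equalize-frequency.py | check
-- ===== SOURCE A (Python) =====
-- def check(hm):
--     s = set()
--     for key in hm:
--         if hm[key] > 0:
--             s.add(hm[key])
--     if len(s) == 1:
--         return True
--     return False
-- ===== SOURCE B (Python) =====
-- def check(hm):
--     expected = None
--     for v in hm.values():
--         if v > 0:
--             if expected is None:
--                 expected = v
--             elif v != expected:
--                 return False
--     return expected is not None
-- ===== Notes on version B (the rewrite author's own statement) =====
-- stated objective: simpler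
-- what changed: B scans the values once keeping a single scalar candidate and returns False at the first mismatching positive frequency, instead of building a set of all positive frequencies and testing its size; no set is allocated and the scan stops early.
import Mathlib
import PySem

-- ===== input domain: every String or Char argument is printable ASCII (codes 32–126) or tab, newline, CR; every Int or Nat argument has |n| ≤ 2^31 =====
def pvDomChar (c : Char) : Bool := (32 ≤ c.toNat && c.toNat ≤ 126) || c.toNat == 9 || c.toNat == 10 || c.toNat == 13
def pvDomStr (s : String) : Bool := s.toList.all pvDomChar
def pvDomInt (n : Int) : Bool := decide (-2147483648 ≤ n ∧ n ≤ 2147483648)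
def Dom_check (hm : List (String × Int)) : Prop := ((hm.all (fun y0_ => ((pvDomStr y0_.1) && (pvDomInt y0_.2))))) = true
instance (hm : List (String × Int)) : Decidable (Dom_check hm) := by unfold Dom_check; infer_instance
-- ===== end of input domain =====

-- B is simpler: one scan keeping a single scalar candidate with early exit, instead of
-- building a set of the positive frequencies and testing its size.

-- ===== PORT A =====
-- 'for key in hm: if hm[key] > 0: s.add(hm[key])' — iterate the keys, look each one up
def check (hm : List (String × Int)) : Bool :=
  let d := PySem.Dict.mk hm
  let s := hm.foldl (fun s kv =>
      match d.get? kv.1 with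
      | some v => if v > 0 then PySem.Set.add s v else s
      | none => s)  -- unreachable: the key comes from hm itself
    PySem.Set.empty
  if PySem.Set.len s == 1 then true else false

-- ===== PORT B =====
def checkAltLoop : List (String × Int) → Option Int → Bool
  | [], exp => exp.isSome
  | kv :: rest, exp =>
      if kv.2 > 0 then
        match exp with
        | none => checkAltLoop rest (some kv.2)
        | some e => if kv.2 ≠ e then false else checkAltLoop rest (some e)
      else checkAltLoop rest exp

def check_alt (hm : List (String × Int)) : Bool := checkAltLoop hm none

-- ===== PRECONDITION & SPEC =====
-- Pre_ excludes association lists with duplicate keys: those cannot arise from a Python dict,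
-- and on them A's repeated first-match lookup yields an accidental value.
def Pre_check (hm : List (String × Int)) : Prop := (hm.map Prod.fst).Nodup
instance (hm : List (String × Int)) : Decidable (Pre_check hm) := by unfold Pre_check; infer_instance
def pvWitness_check : (List (String × Int)) := [("a", 2), ("b", 2), ("c", 0)]

def Spec_check (hm : List (String × Int)) (out : Bool) : Prop := out = check_alt hm
instance (hm : List (String × Int)) (out : Bool) : Decidable (Spec_check hm out) := by unfold Spec_check; infer_instance

-- ===== CLAIM (what is proved, stated in full; the proofs are below) =====
def Claim_equal_check : Prop := ∀ (hm : List (String × Int)), Dom_check hm → Pre_check hm → Spec_check hm (check hm)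

-- ===== LEMMAS AND PROOFS =====

-- the positive values of the list
def posVals (hm : List (String × Int)) : List Int :=
  (hm.map Prod.snd).filter (fun v => decide (0 < v))

lemma posVals_cons (kv : String × Int) (rest : List (String × Int)) :
    posVals (kv :: rest) = if 0 < kv.2 then kv.2 :: posVals rest else posVals rest := by
  simp only [posVals, List.map_cons, List.filter_cons]
  by_cases h : 0 < kv.2 <;> simp [h]

-- A's loop, with the (always successful) lookups resolved, is a Set.update by the positive values
lemma checkA_fold (hm l : List (String × Int)) (s : PySem.Set Int)
    (hsub : ∀ kv ∈ l, (PySem.Dict.mk hm).get? kv.1 = some kv.2) :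
    l.foldl (fun s kv =>
      match (PySem.Dict.mk hm).get? kv.1 with
      | some v => if v > 0 then PySem.Set.add s v else s
      | none => s) s = PySem.Set.update s (posVals l) := by
  induction l generalizing s with
  | nil => simp [posVals, PySem.Set.update]
  | cons kv rest ih =>
    have hkv := hsub kv (by simp)
    simp only [List.foldl_cons, hkv, posVals_cons]
    by_cases h : 0 < kv.2
    · rw [if_pos h, if_pos h, PySem.Set.update_cons]
      exact ih _ (fun x hx => hsub x (by simp [hx]))
    · rw [if_neg h, if_neg h]
      exact ih _ (fun x hx => hsub x (by simp [hx]))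

lemma checkA_eq (hm : List (String × Int)) (hnd : (hm.map Prod.fst).Nodup) :
    check hm = ((PySem.Set.ofList (posVals hm)).length == 1) := by
  have hsub : ∀ kv ∈ hm, (PySem.Dict.mk hm).get? kv.1 = some kv.2 := by
    intro kv hkv
    exact PySem.Dict.get?_of_mem_items (d := PySem.Dict.mk hm) (by simpa [PySem.Dict.items] using hkv)
      (by simpa [PySem.Dict.keys, PySem.Dict.items] using hnd)
  simp only [check]
  rw [checkA_fold hm hm PySem.Set.empty hsub]
  have : PySem.Set.update PySem.Set.empty (posVals hm) = PySem.Set.ofList (posVals hm) :=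
    PySem.Set.update_empty _
  rw [this]
  simp [PySem.Set.len]
  by_cases h : (PySem.Set.ofList (posVals hm)).length = 1 <;> simp [h]

-- B's loop after the first positive value e: all remaining positives must equal e
lemma loop_some (l : List (String × Int)) (e : Int) :
    checkAltLoop l (some e) = decide (∀ x ∈ posVals l, x = e) := by
  induction l with
  | nil => simp [checkAltLoop, posVals]
  | cons kv rest ih =>
    simp only [checkAltLoop, posVals_cons]
    by_cases h : 0 < kv.2
    · rw [if_pos h, if_pos h]
      by_cases he : kv.2 = e
      · simp [he, ih]
      · simp [he]
    · rw [if_neg h, if_neg h]; exact ih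

-- B's loop from the start, as a function of the positive-value list
lemma loop_none (l : List (String × Int)) :
    checkAltLoop l none = (match posVals l with
      | [] => false
      | v :: m => decide (∀ x ∈ m, x = v)) := by
  induction l with
  | nil => simp [checkAltLoop, posVals]
  | cons kv rest ih =>
    simp only [checkAltLoop, posVals_cons]
    by_cases h : 0 < kv.2
    · rw [if_pos h, if_pos h, loop_some]
    · rw [if_neg h, if_neg h]; exact ih

-- a deduplicated list has one element iff the list is nonempty with all elements equal to its head
lemma ofList_len_one (v : Int) (m : List Int) :
    ((PySem.Set.ofList (v :: m)).length == 1) = decide (∀ x ∈ m, x = v) := by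
  have key : PySem.Set.discard (PySem.Set.ofList m) v = [] ↔ ∀ x ∈ m, x = v := by
    constructor
    · intro h x hx
      by_contra hne
      have hmem : x ∈ PySem.Set.discard (PySem.Set.ofList m) v :=
        (PySem.Set.mem_discard _ _ _).mpr ⟨(PySem.Set.mem_ofList _ _).mpr hx, hne⟩
      simp [h] at hmem
    · intro h
      rw [List.eq_nil_iff_forall_not_mem]
      intro x hx
      have hx' := (PySem.Set.mem_discard _ _ _).mp hx
      exact hx'.2 (h x ((PySem.Set.mem_ofList _ _).mp hx'.1))
  by_cases h : ∀ x ∈ m, x = v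
  · rw [PySem.Set.ofList_cons, key.mpr h]
    simpa using h
  · have hne : PySem.Set.discard (PySem.Set.ofList m) v ≠ [] := fun he => h (key.mp he)
    have hlen : (PySem.Set.discard (PySem.Set.ofList m) v).length ≠ 0 := by
      simpa [List.length_eq_zero_iff] using hne
    rw [PySem.Set.ofList_cons]
    simp only [List.length_cons, h, decide_false]
    simp only [beq_eq_false_iff_ne, ne_eq]
    omega

-- ===== VERDICT (by name: the statement is the Claim_ definition above) =====
theorem check_spec : Claim_equal_check := by
  intro hm _ hpre
  unfold Spec_check check_alt
  rw [checkA_eq hm hpre, loop_none hm]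
  cases h : posVals hm with
  | nil => simp [PySem.Set.ofList_nil]
  | cons v m => exact ofList_len_one v m
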